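-- pv_equiv track=rewrite | github.com/vk101/algos | src/main/python/max_nums_cost.py | maxPoints_DpTimeOut
-- ===== SOURCE A (Python) =====
-- from typing import List
--
-- def maxPoints_DpTimeOut(points: List[List[int]]) -> int:
--
--     rows = len(points)
--     cols = len(points[0])
--     memo = [[-1 for _ in range(cols)] for _ in range(rows)]
--
--     def backtrack(r: int, c: int):
--         if r>=rows or c>=cols: return 0
--
--         if memo[r][c]>-1:
--             return memo[r][c]
--
--         max_score = 0
--         for col in range(cols):
--             ts = backtrack(r+1, col) + points[r][col] - abs(col-c)
--             max_score = max(max_score, ts)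
--         memo[r][c] = max_score
--
--         return max_score
--
--     max_score = 0
--     for col in range(cols):
--         max_score = max(backtrack(0, col), max_score)
--
--     return max_score
-- ===== SOURCE B (Python) =====
-- from typing import List
--
-- def maxPoints_DpTimeOut(points: List[List[int]]) -> int:
--     # Bottom-up DP with left/right prefix-max sweeps: O(rows*cols) instead of O(rows*cols^2).
--     cols = len(points[0])
--     if cols == 0:
--         return 0
--     dp = [0] * cols
--     for row in reversed(points):
--         v = [dp[c] + row[c] for c in range(cols)]
--         left = [0] * cols
--         run = v[0]
--         for c in range(cols):
--             run = max(run - 1, v[c])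
--             left[c] = run
--         right = [0] * cols
--         run = v[-1]
--         for c in range(cols - 1, -1, -1):
--             run = max(run - 1, v[c])
--             right[c] = run
--         dp = [max(0, left[c], right[c]) for c in range(cols)]
--     return max(dp)
-- ===== Notes on version B (the rewrite author's own statement) =====
-- stated objective: faster
-- what changed: Replaces the memoized top-down recursion with an O(cols) inner scan per cell by a bottom-up row DP using left-to-right and right-to-left running-max sweeps, removing the inner scan entirely.
import Mathlib
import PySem

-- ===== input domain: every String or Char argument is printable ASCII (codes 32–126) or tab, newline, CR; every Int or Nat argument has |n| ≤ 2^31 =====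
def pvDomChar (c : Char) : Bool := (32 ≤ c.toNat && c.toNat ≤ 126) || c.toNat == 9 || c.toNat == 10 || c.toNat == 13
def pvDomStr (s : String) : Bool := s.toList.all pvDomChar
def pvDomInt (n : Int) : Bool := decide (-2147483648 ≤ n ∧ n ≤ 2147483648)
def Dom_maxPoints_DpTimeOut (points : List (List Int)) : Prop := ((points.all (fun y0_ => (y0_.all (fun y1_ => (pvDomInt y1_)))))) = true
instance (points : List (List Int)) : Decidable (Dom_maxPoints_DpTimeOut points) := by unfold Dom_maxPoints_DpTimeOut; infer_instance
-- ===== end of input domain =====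

-- B replaces A's memoized top-down recursion (O(cols) scan per cell) by a bottom-up row DP
-- with left-to-right / right-to-left running-max sweeps: O(rows*cols) instead of O(rows*cols^2).

-- ===== PORT A =====
-- 2D reads/writes; all indices produced by range() are nonnegative and (on Pre_) in range,
-- where getD/set are exact for Python's list indexing.
def pvGet2 (m : List (List Int)) (r c : Nat) : Int := (m.getD r []).getD c 0
def pvSet2 (m : List (List Int)) (r c : Nat) (x : Int) : List (List Int) :=
  m.set r ((m.getD r []).set c x)

-- backtrack, with the memo table threaded through as state; fuel = rows+1 bounds the
-- recursion depth (each call increases r, and r ≥ rows returns immediately).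
def btkA (pts : List (List Int)) (rows cols : Nat) :
    Nat → Nat → Nat → List (List Int) → Int × List (List Int)
  | 0, _, _, memo => (0, memo)
  | f+1, r, c, memo =>
    if rows ≤ r ∨ cols ≤ c then (0, memo)
    else if pvGet2 memo r c > -1 then (pvGet2 memo r c, memo)
    else
      let p := (List.range cols).foldl
        (fun (s : Int × List (List Int)) col =>
          let q := btkA pts rows cols f (r+1) col s.2
          (max s.1 (q.1 + pvGet2 pts r col - |((col : Int) - (c : Int))|), q.2))
        (0, memo)
      (p.1, pvSet2 p.2 r c p.1)

def maxPoints_DpTimeOut (points : List (List Int)) : Int :=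
  let rows := points.length
  let cols := (points.getD 0 []).length   -- len(points[0]); Python raises on [] → Pre_
  let memo0 := List.replicate rows (List.replicate cols (-1 : Int))
  ((List.range cols).foldl
    (fun (s : Int × List (List Int)) col =>
      let q := btkA points rows cols (rows+1) 0 col s.2
      (max q.1 s.1, q.2))
    (0, memo0)).1

-- ===== PORT B =====
-- running max with decay 1 per step: run = max(run - 1, v[c]) ; collects the successive runs
def pvRunL : Int → List Int → List Int
  | _, [] => []
  | run, x :: xs => (max (run - 1) x) :: pvRunL (max (run - 1) x) xs

def maxPoints_DpTimeOut_alt (points : List (List Int)) : Int :=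
  let cols := (points.getD 0 []).length
  if cols = 0 then 0
  else
    let dp := points.reverse.foldl
      (fun dp row =>
        let v := (List.range cols).map (fun c => dp.getD c 0 + row.getD c 0)
        let left := pvRunL (v.getD 0 0) v
        let right := (pvRunL (v.reverse.getD 0 0) v.reverse).reverse
        (List.range cols).map (fun c => max 0 (max (left.getD c 0) (right.getD c 0))))
      (List.replicate cols (0 : Int))
    match dp with
    | [] => 0
    | x :: xs => xs.foldl max x

-- ===== PRECONDITION & SPEC =====
-- Pre_ excludes exactly the inputs where Python A raises IndexError: the empty list
-- (points[0]) and inputs with a row shorter than row 0 (points[r][col], col < cols).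
def Pre_maxPoints_DpTimeOut (points : List (List Int)) : Prop :=
  points ≠ [] ∧ ∀ row ∈ points, (points.getD 0 []).length ≤ row.length
instance (points : List (List Int)) : Decidable (Pre_maxPoints_DpTimeOut points) := by
  unfold Pre_maxPoints_DpTimeOut; infer_instance

def pvWitness_maxPoints_DpTimeOut : List (List Int) := [[1, 2, 3], [1, 5, 1], [4, 1, 1]]

def Spec_maxPoints_DpTimeOut (points : List (List Int)) (out : Int) : Prop := out = maxPoints_DpTimeOut_alt points
instance (points : List (List Int)) (out : Int) : Decidable (Spec_maxPoints_DpTimeOut points out) := by unfold Spec_maxPoints_DpTimeOut; infer_instance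

-- ===== CLAIM (what is proved, stated in full; the proofs are below) =====
def Claim_equal_maxPoints_DpTimeOut : Prop := ∀ (points : List (List Int)), Dom_maxPoints_DpTimeOut points → Pre_maxPoints_DpTimeOut points → Spec_maxPoints_DpTimeOut points (maxPoints_DpTimeOut points)

-- ===== LEMMAS AND PROOFS =====

-- the memo-free value of backtrack r c, by fuel
def pureV (pts : List (List Int)) (rows cols : Nat) : Nat → Nat → Nat → Int
  | 0, _, _ => 0
  | f+1, r, c =>
    if rows ≤ r ∨ cols ≤ c then 0
    else (List.range cols).foldl
      (fun ms col => max ms (pureV pts rows cols f (r+1) col + pvGet2 pts r col - |((col : Int) - (c : Int))|)) 0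

def pval (pts : List (List Int)) (rows cols r c : Nat) : Int :=
  pureV pts rows cols (rows + 1 - r) r c

-- max of g over 0..n
def maxRange (g : Nat → Int) : Nat → Int
  | 0 => g 0
  | n+1 => max (maxRange g n) (g (n+1))

theorem maxRange_congr (f g : Nat → Int) (n : Nat) (h : ∀ j ≤ n, f j = g j) :
    maxRange f n = maxRange g n := by
  induction n with
  | zero => simpa using h 0 (by omega)
  | succ n ih =>
    simp only [maxRange]
    rw [ih (fun j hj => h j (by omega)), h (n+1) (by omega)]

theorem maxRange_le (g : Nat → Int) (n j : Nat) (h : j ≤ n) : g j ≤ maxRange g n := by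
  induction n with
  | zero =>
    have : j = 0 := by omega
    subst this; exact le_refl _
  | succ n ih =>
    rcases Nat.lt_or_ge j (n+1) with hj | hj
    · exact le_trans (ih (by omega)) (le_max_left _ _)
    · have : j = n + 1 := by omega
      subst this; exact le_max_right _ _

theorem maxRange_exists (g : Nat → Int) (n : Nat) : ∃ j ≤ n, maxRange g n = g j := by
  induction n with
  | zero => exact ⟨0, le_refl _, rfl⟩
  | succ n ih =>
    obtain ⟨j, hj, hv⟩ := ih
    rcases max_cases (maxRange g n) (g (n+1)) with ⟨h1, _⟩ | ⟨h1, _⟩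
    · refine ⟨j, by omega, ?_⟩
      show max (maxRange g n) (g (n+1)) = g j
      rw [h1, hv]
    · refine ⟨n+1, le_refl _, ?_⟩
      show max (maxRange g n) (g (n+1)) = g (n+1)
      rw [h1]

theorem maxRange_shift (f : Nat → Int) (n : Nat) :
    maxRange f (n+1) = max (f 0) (maxRange (fun j => f (j+1)) n) := by
  induction n with
  | zero => simp [maxRange]
  | succ n ih => simp only [maxRange] at *; rw [ih, max_assoc]

theorem foldl_congr' (f g : Int → Nat → Int) (l : List Nat)
    (h : ∀ a x, x ∈ l → f a x = g a x) : ∀ a, l.foldl f a = l.foldl g a := by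
  induction l with
  | nil => intro a; rfl
  | cons x xs ih =>
    intro a
    simp only [List.foldl_cons]
    rw [h a x (by simp)]
    exact ih (fun a y hy => h a y (by simp [hy])) _

theorem foldl_max_eq_maxRange (g : Nat → Int) (n : Nat) (a : Int) :
    (List.range (n+1)).foldl (fun ms x => max ms (g x)) a = max a (maxRange g n) := by
  induction n generalizing a with
  | zero => simp [List.range_succ, maxRange]
  | succ n ih =>
    rw [List.range_succ, List.foldl_append, ih]
    simp [maxRange, max_assoc]

theorem foldl_max_init_le (g : Nat → Int) (l : List Nat) : ∀ a : Int,
    a ≤ l.foldl (fun ms x => max ms (g x)) a := by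
  induction l with
  | nil => intro a; simp
  | cons x xs ih =>
    intro a
    exact le_trans (le_max_left a (g x)) (ih _)

theorem pureV_nonneg (pts : List (List Int)) (rows cols : Nat) :
    ∀ f r c, 0 ≤ pureV pts rows cols f r c := by
  intro f
  induction f with
  | zero => intro r c; simp [pureV]
  | succ f ih =>
    intro r c
    simp only [pureV]
    split
    · exact le_refl 0
    · exact foldl_max_init_le _ _ 0

theorem pval_nonneg (pts : List (List Int)) (rows cols r c : Nat) :
    0 ≤ pval pts rows cols r c := pureV_nonneg pts rows cols _ r c

theorem pval_zero (pts : List (List Int)) (rows cols r c : Nat)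
    (h : rows ≤ r ∨ cols ≤ c) : pval pts rows cols r c = 0 := by
  unfold pval
  cases hf : rows + 1 - r with
  | zero => rfl
  | succ f => simp [pureV, h]

theorem pval_unfold (pts : List (List Int)) (rows cols r c : Nat)
    (hr : r < rows) (hc : c < cols) :
    pval pts rows cols r c = (List.range cols).foldl
      (fun ms col => max ms (pval pts rows cols (r+1) col + pvGet2 pts r col - |((col : Int) - (c : Int))|)) 0 := by
  have h2 : rows + 1 - r = (rows - r) + 1 := by omega
  have h3 : rows + 1 - (r + 1) = rows - r := by omega
  unfold pval
  rw [h2, h3]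
  simp only [pureV]
  rw [if_neg (by omega)]

-- ===== A-side: the memoized recursion computes pval =====

def MemoOK (pts : List (List Int)) (rows cols : Nat) (m : List (List Int)) : Prop :=
  m.length = rows ∧ (∀ r < rows, (m.getD r []).length = cols) ∧
  ∀ r c : Nat, pvGet2 m r c = -1 ∨ pvGet2 m r c = pval pts rows cols r c

theorem getD_set_list (l : List Int) (i : Nat) (x d : Int) (j : Nat) :
    (l.set i x).getD j d = if j = i ∧ i < l.length then x else l.getD j d := by
  by_cases hj : j < l.length
  · rw [List.getD_eq_getElem _ _ (by simpa using hj), List.getD_eq_getElem _ _ hj, List.getElem_set]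
    by_cases hij : i = j
    · subst hij; rw [if_pos rfl, if_pos ⟨rfl, by omega⟩]
    · rw [if_neg hij, if_neg (by rintro ⟨rfl, -⟩; exact hij rfl)]
  · rw [List.getD_eq_default _ _ (by simpa using Nat.le_of_not_lt hj),
      List.getD_eq_default _ _ (Nat.le_of_not_lt hj)]
    rw [if_neg (by rintro ⟨rfl, h⟩; omega)]

theorem getD_set_outer (m : List (List Int)) (i : Nat) (row : List Int) (j : Nat) :
    (m.set i row).getD j [] = if j = i ∧ i < m.length then row else m.getD j [] := by
  by_cases hj : j < m.length
  · rw [List.getD_eq_getElem _ _ (by simpa using hj), List.getD_eq_getElem _ _ hj, List.getElem_set]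
    by_cases hij : i = j
    · subst hij; rw [if_pos rfl, if_pos ⟨rfl, by omega⟩]
    · rw [if_neg hij, if_neg (by rintro ⟨rfl, -⟩; exact hij rfl)]
  · rw [List.getD_eq_default _ _ (by simpa using Nat.le_of_not_lt hj),
      List.getD_eq_default _ _ (Nat.le_of_not_lt hj)]
    rw [if_neg (by rintro ⟨rfl, h⟩; omega)]

theorem MemoOK_set (pts : List (List Int)) (rows cols : Nat) (m : List (List Int))
    (hm : MemoOK pts rows cols m) (r c : Nat) (hr : r < rows) (hc : c < cols) :
    MemoOK pts rows cols (pvSet2 m r c (pval pts rows cols r c)) := by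
  obtain ⟨hlen, hrow, hval⟩ := hm
  refine ⟨by simp [pvSet2, hlen], ?_, ?_⟩
  · intro r' hr'
    unfold pvSet2
    rw [getD_set_outer]
    split_ifs with h
    · rw [List.length_set]
      exact hrow r hr
    · exact hrow r' hr'
  · intro r' c'
    unfold pvGet2 pvSet2
    rw [getD_set_outer]
    split_ifs with h
    · obtain ⟨hre, _⟩ := h
      rw [getD_set_list]
      split_ifs with h2
      · right; rw [hre, h2.1]
      · subst hre; exact hval r' c'
    · exact hval r' c'

theorem MemoOK_init (pts : List (List Int)) (rows cols : Nat) :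
    MemoOK pts rows cols (List.replicate rows (List.replicate cols (-1 : Int))) := by
  have hrowr : ∀ r < rows,
      (List.replicate rows (List.replicate cols (-1 : Int))).getD r [] = List.replicate cols (-1 : Int) := by
    intro r hr
    rw [List.getD_eq_getElem _ _ (by simpa using hr)]
    simp
  refine ⟨by simp, ?_, ?_⟩
  · intro r hr; rw [hrowr r hr]; simp
  · intro r c
    by_cases hr : r < rows
    · unfold pvGet2
      rw [hrowr r hr]
      by_cases hc : c < cols
      · left
        rw [List.getD_eq_getElem _ _ (by simpa using hc)]
        simp
      · right
        rw [List.getD_eq_default _ _ (by simpa using Nat.le_of_not_lt hc),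
          pval_zero _ _ _ _ _ (Or.inr (Nat.le_of_not_lt hc))]
    · right
      unfold pvGet2
      have houter : (List.replicate rows (List.replicate cols (-1 : Int))).getD r [] = ([] : List Int) :=
        List.getD_eq_default _ _ (by simpa using Nat.le_of_not_lt hr)
      rw [houter, pval_zero _ _ _ _ _ (Or.inl (Nat.le_of_not_lt hr))]
      simp

theorem btk_ok (pts : List (List Int)) (rows cols : Nat) :
    ∀ (f r c : Nat) (m : List (List Int)), rows < r + f → MemoOK pts rows cols m →
    (btkA pts rows cols f r c m).1 = pval pts rows cols r c ∧
    MemoOK pts rows cols (btkA pts rows cols f r c m).2 := by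
  intro f
  induction f with
  | zero =>
    intro r c m hf hm
    exact ⟨(pval_zero pts rows cols r c (Or.inl (by omega))).symm, hm⟩
  | succ f ih =>
    intro r c m hf hm
    by_cases hg : rows ≤ r ∨ cols ≤ c
    · have : btkA pts rows cols (f+1) r c m = (0, m) := by
        simp only [btkA]; rw [if_pos hg]
      rw [this]
      exact ⟨(pval_zero pts rows cols r c hg).symm, hm⟩
    · have hg' : r < rows ∧ c < cols := by
        rcases Nat.lt_or_ge r rows with h1 | h1
        · rcases Nat.lt_or_ge c cols with h2 | h2
          · exact ⟨h1, h2⟩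
          · exact absurd (Or.inr h2) hg
        · exact absurd (Or.inl h1) hg
      by_cases hmm : pvGet2 m r c > -1
      · have : btkA pts rows cols (f+1) r c m = (pvGet2 m r c, m) := by
          simp only [btkA]; rw [if_neg hg, if_pos hmm]
        rw [this]
        refine ⟨?_, hm⟩
        rcases hm.2.2 r c with h | h
        · rw [h] at hmm; omega
        · exact h
      · have fold_ok : ∀ (l : List Nat) (a : Int) (m0 : List (List Int)), MemoOK pts rows cols m0 →
            (l.foldl (fun (s : Int × List (List Int)) col =>
              (max s.1 ((btkA pts rows cols f (r+1) col s.2).1 + pvGet2 pts r col - |((col : Int) - (c : Int))|),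
               (btkA pts rows cols f (r+1) col s.2).2)) (a, m0)).1
              = l.foldl (fun ms col => max ms (pval pts rows cols (r+1) col + pvGet2 pts r col - |((col : Int) - (c : Int))|)) a ∧
            MemoOK pts rows cols
              (l.foldl (fun (s : Int × List (List Int)) col =>
                (max s.1 ((btkA pts rows cols f (r+1) col s.2).1 + pvGet2 pts r col - |((col : Int) - (c : Int))|),
                 (btkA pts rows cols f (r+1) col s.2).2)) (a, m0)).2 := by
          intro l
          induction l with
          | nil => intro a m0 hm0; exact ⟨rfl, hm0⟩
          | cons x xs ihl =>
            intro a m0 hm0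
            have hx := ih (r+1) x m0 (by omega) hm0
            simp only [List.foldl_cons]
            rw [hx.1]
            exact ihl _ _ hx.2
        obtain ⟨h1, h2⟩ := fold_ok (List.range cols) 0 m hm
        have hv : ((List.range cols).foldl (fun (s : Int × List (List Int)) col =>
              (max s.1 ((btkA pts rows cols f (r+1) col s.2).1 + pvGet2 pts r col - |((col : Int) - (c : Int))|),
               (btkA pts rows cols f (r+1) col s.2).2)) (0, m)).1 = pval pts rows cols r c := by
          rw [h1]
          exact (pval_unfold pts rows cols r c hg'.1 hg'.2).symm
        simp only [btkA]
        rw [if_neg hg, if_neg hmm]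
        refine ⟨hv, ?_⟩
        rw [hv]
        exact MemoOK_set pts rows cols _ h2 r c hg'.1 hg'.2

theorem A_eq_fold (points : List (List Int)) :
    maxPoints_DpTimeOut points =
      (List.range (points.getD 0 []).length).foldl
        (fun ms col => max (pval points points.length (points.getD 0 []).length 0 col) ms) 0 := by
  unfold maxPoints_DpTimeOut
  have outer : ∀ (l : List Nat) (a : Int) (m : List (List Int)),
      MemoOK points points.length (points.getD 0 []).length m →
      (l.foldl (fun (s : Int × List (List Int)) col =>
        (max (btkA points points.length (points.getD 0 []).length (points.length+1) 0 col s.2).1 s.1,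
         (btkA points points.length (points.getD 0 []).length (points.length+1) 0 col s.2).2)) (a, m)).1
      = l.foldl (fun ms col => max (pval points points.length (points.getD 0 []).length 0 col) ms) a := by
    intro l
    induction l with
    | nil => intro a m hm; rfl
    | cons x xs ihl =>
      intro a m hm
      have hx := btk_ok points points.length (points.getD 0 []).length (points.length+1) 0 x m (by omega) hm
      simp only [List.foldl_cons]
      rw [hx.1]
      exact ihl _ _ hx.2
  exact outer (List.range (points.getD 0 []).length) 0 _
    (MemoOK_init points points.length (points.getD 0 []).length)

-- ===== B-side: sweeps compute pval =====

theorem pvRunL_length (a : Int) (v : List Int) : (pvRunL a v).length = v.length := by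
  induction v generalizing a with
  | nil => rfl
  | cons x xs ih => simp [pvRunL, ih]

theorem maxRange_getD_cons (x : Int) (xs : List Int) (i : Nat) :
    maxRange (fun j => (x :: xs).getD j 0 - (((i+1 : Nat) : Int) - (j : Int))) (i+1)
      = max (x - ((i : Int) + 1)) (maxRange (fun j => xs.getD j 0 - ((i : Int) - (j : Int))) i) := by
  rw [maxRange_shift]
  have e1 : (x :: xs).getD 0 0 - (((i+1 : Nat) : Int) - ((0 : Nat) : Int)) = x - ((i : Int) + 1) := by
    simp only [List.getD_cons_zero]
    push_cast
    ring
  have e2 : maxRange (fun j => (x :: xs).getD (j+1) 0 - (((i+1 : Nat) : Int) - ((j+1 : Nat) : Int))) i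
      = maxRange (fun j => xs.getD j 0 - ((i : Int) - (j : Int))) i := by
    apply maxRange_congr
    intro j hj
    show (x :: xs).getD (j+1) 0 - (((i+1 : Nat) : Int) - ((j+1 : Nat) : Int)) = xs.getD j 0 - ((i : Int) - (j : Int))
    rw [List.getD_cons_succ]
    push_cast
    ring
  exact congrArg₂ max e1 e2

theorem runL_getD (v : List Int) : ∀ (a : Int) (i : Nat), i < v.length →
    (pvRunL a v).getD i 0 =
      max (a - ((i : Int) + 1)) (maxRange (fun j => v.getD j 0 - ((i : Int) - (j : Int))) i) := by
  induction v with
  | nil => intro a i h; simp at h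
  | cons x xs ih =>
    intro a i h
    cases i with
    | zero => simp [pvRunL, maxRange]
    | succ i =>
      have hi : i < xs.length := by simpa using h
      show (pvRunL (max (a-1) x) xs).getD i 0 = _
      rw [ih (max (a-1) x) i hi, maxRange_getD_cons]
      rw [show max (a-1) x - ((i : Int)+1) = max ((a-1) - ((i : Int)+1)) (x - ((i : Int)+1)) from
        (max_sub_sub_right _ _ _).symm]
      rw [max_assoc]
      exact congrArg₂ max (by push_cast; ring) rfl

theorem left_getD (v : List Int) (i : Nat) (h : i < v.length) :
    (pvRunL (v.getD 0 0) v).getD i 0 =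
      maxRange (fun j => v.getD j 0 - ((i : Int) - (j : Int))) i := by
  rw [runL_getD v _ i h]
  apply max_eq_right
  have h0 : v.getD 0 0 - ((i : Int) - ((0 : Nat) : Int)) ≤ maxRange (fun j => v.getD j 0 - ((i : Int) - (j : Int))) i :=
    maxRange_le _ i 0 (by omega)
  have h1 : v.getD 0 0 - ((i : Int) + 1) ≤ v.getD 0 0 - ((i : Int) - ((0 : Nat) : Int)) := by
    push_cast
    omega
  exact le_trans h1 h0

theorem getD_reverse (l : List Int) (i : Nat) (h : i < l.length) :
    l.reverse.getD i 0 = l.getD (l.length - 1 - i) 0 := by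
  rw [List.getD_eq_getElem _ _ (by simpa using h), List.getD_eq_getElem _ _ (by omega),
    List.getElem_reverse]

theorem sweep_eq (v : List Int) (hn : 0 < v.length) (c : Nat) (hc : c < v.length) :
    max ((pvRunL (v.getD 0 0) v).getD c 0)
        (((pvRunL (v.reverse.getD 0 0) v.reverse).reverse).getD c 0)
    = maxRange (fun col => v.getD col 0 - |((col : Int) - (c : Int))|) (v.length - 1) := by
  set n := v.length with hn'
  set t : Nat → Int := fun col => v.getD col 0 - |((col : Int) - (c : Int))| with ht
  have hL : (pvRunL (v.getD 0 0) v).getD c 0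
      = maxRange (fun j => v.getD j 0 - ((c : Int) - (j : Int))) c := left_getD v c hc
  have hrevlen : v.reverse.length = n := by simp [hn']
  have hlenr : (pvRunL (v.reverse.getD 0 0) v.reverse).length = n := by
    rw [pvRunL_length, hrevlen]
  have hR : ((pvRunL (v.reverse.getD 0 0) v.reverse).reverse).getD c 0
      = maxRange (fun j => v.reverse.getD j 0 - (((n - 1 - c : Nat) : Int) - (j : Int))) (n - 1 - c) := by
    have hcl : c < (pvRunL (v.reverse.getD 0 0) v.reverse).length := by omega
    rw [getD_reverse _ c hcl, hlenr]
    exact left_getD v.reverse (n - 1 - c) (by rw [hrevlen]; omega)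
  rw [hL, hR]
  apply le_antisymm
  · apply max_le
    · obtain ⟨j, hj, hv⟩ := maxRange_exists (fun j => v.getD j 0 - ((c : Int) - (j : Int))) c
      rw [hv]
      have hle := maxRange_le t (n-1) j (by omega)
      have habs : ((c : Int) - (j : Int)) = |((j : Int) - (c : Int))| := by
        rw [abs_sub_comm, abs_of_nonneg (by push_cast; omega)]
      rw [habs]
      exact hle
    · obtain ⟨j, hj, hv⟩ := maxRange_exists
        (fun j => v.reverse.getD j 0 - (((n - 1 - c : Nat) : Int) - (j : Int))) (n - 1 - c)
      rw [hv]
      have hvr : v.reverse.getD j 0 = v.getD (n - 1 - j) 0 :=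
        getD_reverse v j (by omega)
      have hle := maxRange_le t (n-1) (n - 1 - j) (by omega)
      have habs : (((n - 1 - c : Nat) : Int) - (j : Int)) = |(((n - 1 - j : Nat) : Int) - (c : Int))| := by
        rw [abs_of_nonneg (by push_cast; omega)]
        push_cast
        omega
      rw [hvr, habs]
      exact hle
  · obtain ⟨j, hj, hv⟩ := maxRange_exists t (n-1)
    rw [hv]
    by_cases hjc : j ≤ c
    · apply le_trans _ (le_max_left _ _)
      have hle := maxRange_le (fun j => v.getD j 0 - ((c : Int) - (j : Int))) c j hjc
      have habs : t j = v.getD j 0 - ((c : Int) - (j : Int)) := by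
        rw [ht]
        show v.getD j 0 - |((j : Int) - (c : Int))| = _
        rw [abs_sub_comm, abs_of_nonneg (by push_cast; omega)]
      rw [habs]
      exact hle
    · apply le_trans _ (le_max_right _ _)
      have hvr : v.getD j 0 = v.reverse.getD (n - 1 - j) 0 := by
        rw [getD_reverse v (n - 1 - j) (by omega)]
        congr 1
        omega
      have hle := maxRange_le (fun j' => v.reverse.getD j' 0 - (((n - 1 - c : Nat) : Int) - (j' : Int)))
        (n - 1 - c) (n - 1 - j) (by omega)
      have habs : t j = v.reverse.getD (n - 1 - j) 0 - (((n - 1 - c : Nat) : Int) - ((n - 1 - j : Nat) : Int)) := by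
        rw [ht]
        show v.getD j 0 - |((j : Int) - (c : Int))| = _
        rw [hvr, abs_of_nonneg (by push_cast; omega)]
        push_cast
        omega
      rw [habs]
      exact hle

theorem B_fold (points : List (List Int)) (cols : Nat) (hpos : 0 < cols) :
    ∀ (s : List (List Int)) (r : Nat), r + s.length = points.length → s = points.drop r →
    s.foldr (fun row dp =>
        let v := (List.range cols).map (fun c => dp.getD c 0 + row.getD c 0)
        let left := pvRunL (v.getD 0 0) v
        let right := (pvRunL (v.reverse.getD 0 0) v.reverse).reverse
        (List.range cols).map (fun c => max 0 (max (left.getD c 0) (right.getD c 0))))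
      (List.replicate cols (0 : Int))
    = (List.range cols).map (fun c => pval points points.length cols r c) := by
  intro s
  induction s with
  | nil =>
    intro r hr _
    simp only [List.foldr_nil]
    apply List.ext_getElem (by simp)
    intro i h1 h2
    simp only [List.getElem_replicate, List.getElem_map, List.getElem_range]
    have hrr : points.length ≤ r := by simp at hr; omega
    rw [pval_zero _ _ _ _ _ (Or.inl hrr)]
  | cons row s' ih =>
    intro r hr hdrop
    have hrlt : r < points.length := by simp at hr; omega
    have hcons : points.drop r = points[r] :: points.drop (r+1) := List.drop_eq_getElem_cons hrlt
    rw [hcons] at hdrop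
    have hrow : points.getD r [] = row := by
      rw [List.getD_eq_getElem _ _ hrlt]
      exact (List.cons.injEq _ _ _ _ ▸ hdrop).1.symm
    have hdrop' : s' = points.drop (r+1) := (List.cons.injEq _ _ _ _ ▸ hdrop).2
    simp only [List.foldr_cons]
    rw [ih (r+1) (by simp at hr ⊢; omega) hdrop']
    set dp := (List.range cols).map (fun c => pval points points.length cols (r+1) c) with hdp
    set v := (List.range cols).map (fun c => dp.getD c 0 + row.getD c 0) with hv
    have hvlen : v.length = cols := by simp [hv]
    have hvget : ∀ col, col < cols → v.getD col 0 = pval points points.length cols (r+1) col + pvGet2 points r col := by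
      intro col hcol
      rw [List.getD_eq_getElem _ _ (by omega)]
      simp only [hv, List.getElem_map, List.getElem_range]
      congr 1
      · rw [hdp, List.getD_eq_getElem _ _ (by simp [hdp]; omega)]
        simp
      · unfold pvGet2
        rw [hrow]
    apply List.ext_getElem (by simp)
    intro i h1 h2
    simp only [List.getElem_map, List.getElem_range]
    have hi : i < cols := by simpa using h1
    have hs := sweep_eq v (by omega) i (by omega)
    rw [hvlen] at hs
    rw [hs, pval_unfold points points.length cols r i hrlt hi]
    obtain ⟨m, hm⟩ : ∃ m, cols = m + 1 := ⟨cols - 1, by omega⟩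
    rw [hm, foldl_max_eq_maxRange]
    congr 1
    apply maxRange_congr
    intro j hj
    rw [hvget j (by omega), hm]

theorem B_fold' (points : List (List Int)) (cols : Nat) (hpos : 0 < cols) :
    points.reverse.foldl
      (fun dp row =>
        let v := (List.range cols).map (fun c => dp.getD c 0 + row.getD c 0)
        let left := pvRunL (v.getD 0 0) v
        let right := (pvRunL (v.reverse.getD 0 0) v.reverse).reverse
        (List.range cols).map (fun c => max 0 (max (left.getD c 0) (right.getD c 0))))
      (List.replicate cols (0 : Int))
    = (List.range cols).map (fun c => pval points points.length cols 0 c) := by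
  rw [List.foldl_reverse]
  exact B_fold points cols hpos points 0 (by simp) (by simp)

theorem B_last (g : Nat → Int) (m : Nat) :
    ∃ xs, (List.range (m+1)).map g = g 0 :: xs ∧ xs.foldl max (g 0) = maxRange g m := by
  induction m with
  | zero => exact ⟨[], by simp [List.range_succ], rfl⟩
  | succ m ih =>
    obtain ⟨xs, hxs, hfold⟩ := ih
    refine ⟨xs ++ [g (m+1)], ?_, ?_⟩
    · rw [List.range_succ, List.map_append, hxs]
      rfl
    · rw [List.foldl_append, hfold]
      rfl

-- ===== VERDICT (by name: the statement is the Claim_ definition above) =====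
theorem maxPoints_DpTimeOut_spec : Claim_equal_maxPoints_DpTimeOut := by
  unfold Claim_equal_maxPoints_DpTimeOut
  intro points _ _
  unfold Spec_maxPoints_DpTimeOut
  rw [A_eq_fold points]
  unfold maxPoints_DpTimeOut_alt
  by_cases h0 : (points.getD 0 []).length = 0
  · rw [h0]
    simp
  · rw [if_neg h0, B_fold' points (points.getD 0 []).length (by omega)]
    obtain ⟨m, hm⟩ : ∃ m, (points.getD 0 []).length = m + 1 :=
      ⟨(points.getD 0 []).length - 1, by omega⟩
    rw [hm]
    obtain ⟨xs, hxs, hfold⟩ := B_last (fun c => pval points points.length (m+1) 0 c) m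
    have hA : (List.range (m+1)).foldl
        (fun ms col => max (pval points points.length (m+1) 0 col) ms) 0
        = maxRange (fun c => pval points points.length (m+1) 0 c) m := by
      rw [foldl_congr' (fun ms col => max (pval points points.length (m+1) 0 col) ms)
        (fun ms col => max ms (pval points points.length (m+1) 0 col)) (List.range (m+1))
        (fun a x _ => max_comm _ _) 0, foldl_max_eq_maxRange]
      exact max_eq_right (le_trans (pval_nonneg points points.length (m+1) 0 0)
        (maxRange_le _ m 0 (by omega)))
    conv_rhs => rw [hxs]
    rw [hA, ← hfold]
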